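-- pv_equiv track=rewrite | github.com/jayak0776/Accenture-Reinprep-Problems-Codes | RienPrep/P24MinimumNoOfKeysPresses.py | minimumNoOfKeyPresses
-- ===== SOURCE A (Python) =====
-- def minimumNoOfKeyPresses(s):
--     n=len(s)
--     dp=[float('inf')]*(n+1)
--     dp[0]=0
--     for i in range(1,n+1):
--         dp[i]=dp[i-1]+1
--         if i>=2 and s[i-2]=='0' and s[i-1]=='0':
--             dp[i]=min(dp[i],dp[i-2]+1)
--     return dp[n]
-- ===== SOURCE B (Python) =====
-- def minimumNoOfKeyPresses(s):
--     n = len(s)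
--     count = 0
--     i = 0
--     while i < n:
--         if i + 1 < n and s[i] == '0' and s[i + 1] == '0':
--             i += 2
--         else:
--             i += 1
--         count += 1
--     return count
-- ===== Notes on version B (the rewrite author's own statement) =====
-- stated objective: simpler
-- what changed: Replaces the O(n)-space DP array with a greedy forward scan that pairs adjacent '0' characters in place, keeping only an index and a counter.
import Mathlib
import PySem

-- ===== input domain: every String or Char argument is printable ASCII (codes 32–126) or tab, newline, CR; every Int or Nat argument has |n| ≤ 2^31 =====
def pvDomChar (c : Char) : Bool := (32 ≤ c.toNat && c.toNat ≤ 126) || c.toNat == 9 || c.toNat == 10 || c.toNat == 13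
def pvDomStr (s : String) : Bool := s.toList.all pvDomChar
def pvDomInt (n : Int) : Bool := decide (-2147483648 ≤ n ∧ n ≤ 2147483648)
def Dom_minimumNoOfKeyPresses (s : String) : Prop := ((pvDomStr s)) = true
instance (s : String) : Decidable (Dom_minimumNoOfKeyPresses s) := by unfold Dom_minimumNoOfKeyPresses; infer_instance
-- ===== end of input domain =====

-- B replaces A's O(n)-space DP array with a greedy forward scan pairing adjacent '0's (simpler, O(1) extra space).


-- ===== PORT A =====
-- body of A's for-loop: dp[i]=dp[i-1]+1; if i>=2 and s[i-2]=='0' and s[i-1]=='0': dp[i]=min(dp[i],dp[i-2]+1)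
def dpStep (cs : List Char) (dp : List Int) (i : Int) : List Int :=
  let dp := PySem.List.pySetD dp i (PySem.List.pyGetD dp (i-1) 0 + 1)
  if i ≥ 2 ∧ PySem.List.pyGet? cs (i-2) = some '0' ∧ PySem.List.pyGet? cs (i-1) = some '0' then
    PySem.List.pySetD dp i (min (PySem.List.pyGetD dp i 0) (PySem.List.pyGetD dp (i-2) 0 + 1))
  else dp

-- `float('inf')` placeholder: dp[i] is overwritten by dp[i]=dp[i-1]+1 at step i before it is ever
-- read (each step reads only positions < i and the freshly written i), so the placeholder value
-- never reaches the result; it is represented by 0 here — exact on all inputs.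
def minimumNoOfKeyPresses (s : String) : Int :=
  let cs := s.toList
  let n : Int := cs.length
  let dp : List Int := List.replicate (cs.length + 1) 0
  let dp := PySem.List.pySetD dp 0 0
  let dp := (PySem.List.pyRange 1 (n + 1) 1).foldl (dpStep cs) dp
  PySem.List.pyGetD dp n 0

-- ===== PORT B =====
-- B's while loop over the remaining characters: consume "00" with one press, else one char per press
def altGo : List Char → Int
  | [] => 0
  | [_] => 1
  | a :: b :: r => if a = '0' ∧ b = '0' then 1 + altGo r else 1 + altGo (b :: r)

def minimumNoOfKeyPresses_alt (s : String) : Int := altGo s.toList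

-- ===== PRECONDITION & SPEC =====
def Spec_minimumNoOfKeyPresses (s : String) (out : Int) : Prop := out = minimumNoOfKeyPresses_alt s
instance (s : String) (out : Int) : Decidable (Spec_minimumNoOfKeyPresses s out) := by unfold Spec_minimumNoOfKeyPresses; infer_instance

-- ===== CLAIM (what is proved, stated in full; the proofs are below) =====
def Claim_equal_minimumNoOfKeyPresses : Prop := ∀ (s : String), Dom_minimumNoOfKeyPresses s → Spec_minimumNoOfKeyPresses s (minimumNoOfKeyPresses s)

-- ===== LEMMAS AND PROOFS =====

/-- Parity flag: `true` iff B's greedy scan leaves the last character of `l` as an unpaired '0'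
(same recursion shape as `altGo`). -/
def pvPar : List Char → Bool
  | [] => false
  | [a] => a == '0'
  | a :: b :: r => if a = '0' ∧ b = '0' then pvPar r else pvPar (b :: r)

lemma altGo_snoc (l : List Char) (c : Char) :
    altGo (l ++ [c]) = altGo l + (if c = '0' ∧ pvPar l = true then 0 else 1) ∧
    pvPar (l ++ [c]) = (decide (c = '0') && !pvPar l) := by
  fun_induction pvPar l with
  | case1 =>
      by_cases hc : c = '0' <;> simp [altGo, pvPar, hc]
  | case2 a =>
      by_cases ha : a = '0' <;> by_cases hc : c = '0' <;>
        simp [altGo, pvPar, ha, hc]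
  | case3 a b r h ih =>
      refine ⟨?_, ?_⟩
      · simp only [List.cons_append, altGo, if_pos h]
        rw [ih.1]; ring
      · simp only [List.cons_append, pvPar, if_pos h]
        exact ih.2
  | case4 a b r h ih =>
      refine ⟨?_, ?_⟩
      · simp only [List.cons_append, altGo, if_neg h]
        rw [← List.cons_append, ih.1]; ring
      · simp only [List.cons_append, pvPar, if_neg h]
        exact ih.2

lemma getD_set_nat (dp : List Int) (i j : Nat) (v : Int) (hi : i < dp.length) :
    (dp.set i v).getD j 0 = if j = i then v else dp.getD j 0 := by
  by_cases h : j = i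
  · subst h
    simp [List.getD_eq_getElem?_getD, hi]
  · have h' : i ≠ j := fun e => h e.symm
    simp [List.getD_eq_getElem?_getD, h']
    intro e; exact absurd e h

/-- One iteration of A's loop: if positions `j ≤ k` of `dp` hold B's answers on the length-`j`
prefixes, then after `dpStep` at `i = k+1` so do positions `j ≤ k+1`. -/
lemma dpStep_spec (cs : List Char) (dp : List Int) (k : Nat) (hk : k < cs.length)
    (hlen : dp.length = cs.length + 1)
    (hval : ∀ j : Nat, j ≤ k → dp.getD j 0 = altGo (cs.take j)) :
    (dpStep cs dp ((k : Int) + 1)).length = cs.length + 1 ∧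
    ∀ j : Nat, j ≤ k + 1 → (dpStep cs dp ((k : Int) + 1)).getD j 0 = altGo (cs.take j) := by
  have e2 : ((k : Int) + 1) = ((k + 1 : Nat) : Int) := by push_cast; ring
  have hk1 : k + 1 < dp.length := by omega
  have hset : ∀ (d : List Int) (v : Int),
      PySem.List.pySetD d ((k : Int) + 1) v = d.set (k + 1) v := by
    intro d v; rw [e2, PySem.List.pySetD_natCast]
  have hget1 : PySem.List.pyGetD dp ((k : Int) + 1 - 1) 0 = altGo (cs.take k) := by
    have e : (k : Int) + 1 - 1 = ((k : Nat) : Int) := by ring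
    rw [e, PySem.List.pyGetD_natCast]; exact hval k le_rfl
  have htake : cs.take (k + 1) = cs.take k ++ [cs[k]] := by
    rw [List.take_succ, List.getElem?_eq_getElem hk]; rfl
  unfold dpStep
  simp only [hget1, hset]
  set dp1 := dp.set (k + 1) (altGo (cs.take k) + 1) with hdp1
  have hdp1len : dp1.length = cs.length + 1 := by simp [hdp1, hlen]
  have hdp1get : ∀ j : Nat, dp1.getD j 0
      = if j = k + 1 then altGo (cs.take k) + 1 else dp.getD j 0 :=
    fun j => getD_set_nat dp (k + 1) j _ hk1
  rcases k with _ | m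
  · -- k = 0 : the pairing branch is off (i = 1 < 2)
    rw [if_neg (by intro h; have := h.1; simp at this)]
    refine ⟨hdp1len, ?_⟩
    intro j hj
    interval_cases j
    · rw [hdp1get 0, if_neg (by omega)]; exact hval 0 le_rfl
    · rw [hdp1get 1, if_pos rfl, htake]
      have h := (altGo_snoc (cs.take 0) cs[0]).1
      simp only [List.take_zero, List.nil_append, altGo, pvPar] at h ⊢
      rw [h]; simp
  · -- k = m + 1 : i = k+1 ≥ 2; the condition is cs[m] = '0' ∧ cs[m+1] = '0'
    have hm : m < cs.length := by omega
    have hidx2 : ((m + 1 : Nat) : Int) + 1 - 2 = ((m : Nat) : Int) := by push_cast; ring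
    have hidx1 : ((m + 1 : Nat) : Int) + 1 - 1 = ((m + 1 : Nat) : Int) := by push_cast; ring
    have hg2 : PySem.List.pyGet? cs (((m + 1 : Nat) : Int) + 1 - 2) = cs[m]? := by
      rw [hidx2, PySem.List.pyGet?_natCast]
    have hg1 : PySem.List.pyGet? cs (((m + 1 : Nat) : Int) + 1 - 1) = cs[m + 1]? := by
      rw [hidx1, PySem.List.pyGet?_natCast]
    have hsm : cs[m]? = some cs[m] := List.getElem?_eq_getElem hm
    have hsm1 : cs[m + 1]? = some cs[m + 1] := List.getElem?_eq_getElem hk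
    have htakem : cs.take (m + 1) = cs.take m ++ [cs[m]] := by
      rw [List.take_succ, List.getElem?_eq_getElem hm]; rfl
    have hsnoc1 := altGo_snoc (cs.take m) cs[m]
    have hsnoc2 := altGo_snoc (cs.take (m + 1)) cs[m + 1]
    rw [← htakem] at hsnoc1
    rw [← htake] at hsnoc2
    by_cases hcc : cs[m] = '0' ∧ cs[m + 1] = '0'
    · -- pairing branch taken
      rw [if_pos ⟨by push_cast; omega, by rw [hg2, hsm, hcc.1], by rw [hg1, hsm1, hcc.2]⟩]
      have hrd2 : PySem.List.pyGetD dp1 (((m + 1 : Nat) : Int) + 1) 0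
          = altGo (cs.take (m + 1)) + 1 := by
        rw [e2, PySem.List.pyGetD_natCast, hdp1get, if_pos rfl]
      have hrd0 : PySem.List.pyGetD dp1 (((m + 1 : Nat) : Int) + 1 - 2) 0
          = altGo (cs.take m) := by
        rw [hidx2, PySem.List.pyGetD_natCast, hdp1get, if_neg (by omega)]
        exact hval m (by omega)
      rw [hrd2, hrd0]
      refine ⟨by simp [hdp1len], ?_⟩
      intro j hj
      by_cases hjk : j = m + 2
      · subst hjk
        rw [getD_set_nat _ _ _ _ (by omega), if_pos rfl]
        -- greedy bookkeeping: pair the new '0' with the previous one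
        by_cases hp : pvPar (cs.take m) = true
        · have h1 : altGo (cs.take (m + 1)) = altGo (cs.take m) := by
            rw [hsnoc1.1, if_pos ⟨hcc.1, hp⟩]; ring
          have hpar1 : pvPar (cs.take (m + 1)) = false := by
            rw [hsnoc1.2, hp]; simp
          have h2 : altGo (cs.take (m + 1 + 1)) = altGo (cs.take (m + 1)) + 1 := by
            rw [hsnoc2.1, hpar1]; simp
          rw [h2, h1]; omega
        · have hp' : pvPar (cs.take m) = false := by simpa using hp
          have h1 : altGo (cs.take (m + 1)) = altGo (cs.take m) + 1 := by
            rw [hsnoc1.1, if_neg (by rintro ⟨-, hh⟩; rw [hp'] at hh; exact Bool.false_ne_true hh)]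
          have hpar1 : pvPar (cs.take (m + 1)) = true := by
            rw [hsnoc1.2, hp', hcc.1]; simp
          have h2 : altGo (cs.take (m + 1 + 1)) = altGo (cs.take (m + 1)) := by
            rw [hsnoc2.1, if_pos ⟨hcc.2, hpar1⟩]; ring
          rw [h2, h1]; omega
      · rw [getD_set_nat _ _ _ _ (by omega), if_neg hjk, hdp1get, if_neg (by omega)]
        exact hval j (by omega)
    · -- pairing branch not taken
      rw [if_neg (by
        intro h
        obtain ⟨-, h2, h3⟩ := h
        rw [hg2, hsm] at h2
        rw [hg1, hsm1] at h3
        exact hcc ⟨Option.some.inj h2, Option.some.inj h3⟩)]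
      refine ⟨hdp1len, ?_⟩
      intro j hj
      by_cases hjk : j = m + 2
      · subst hjk
        rw [hdp1get, if_pos rfl]
        -- no pair available: the new character costs a full press
        have hone : ¬ (cs[m + 1] = '0' ∧ pvPar (cs.take (m + 1)) = true) := by
          rintro ⟨hz1, hpar⟩
          have hz0 : cs[m] = '0' := by
            by_contra hz0
            rw [hsnoc1.2] at hpar
            simp [hz0] at hpar
          exact hcc ⟨hz0, hz1⟩
        rw [hsnoc2.1, if_neg hone]
      · rw [hdp1get, if_neg (by omega)]
        exact hval j (by omega)

/-- Loop invariant for A's DP fold: after the first `k` iterations the array has its original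
length and position `j ≤ k` holds B's answer on the length-`j` prefix. -/
lemma dpInv (cs : List Char) (k : Nat) (hk : k ≤ cs.length) :
    ((PySem.List.pyRange 1 ((k : Int) + 1) 1).foldl (dpStep cs)
        (PySem.List.pySetD (List.replicate (cs.length + 1) (0 : Int)) 0 0)).length
      = cs.length + 1 ∧
    ∀ j : Nat, j ≤ k →
      ((PySem.List.pyRange 1 ((k : Int) + 1) 1).foldl (dpStep cs)
          (PySem.List.pySetD (List.replicate (cs.length + 1) (0 : Int)) 0 0)).getD j 0
        = altGo (cs.take j) := by
  induction k with
  | zero =>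
      rw [PySem.List.pyRange_one_eq_nil (by norm_num), List.foldl_nil]
      refine ⟨by simp [PySem.List.pySetD, PySem.List.pySet?, PySem.List.pyIdx?], ?_⟩
      intro j hj
      interval_cases j
      simp [altGo, PySem.List.pySetD, PySem.List.pySet?, PySem.List.pyIdx?,
        List.getD_eq_getElem?_getD]
  | succ k ih =>
      obtain ⟨ihlen, ihval⟩ := ih (by omega)
      have hsplit : PySem.List.pyRange 1 (((k + 1 : Nat) : Int) + 1) 1
          = PySem.List.pyRange 1 ((k : Int) + 1) 1 ++ [(k : Int) + 1] := by
        have e : ((k + 1 : Nat) : Int) + 1 = ((k : Int) + 1) + 1 := by push_cast; ring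
        rw [e, PySem.List.pyRange_one_succ_right (by omega)]
      rw [hsplit, List.foldl_append, List.foldl_cons, List.foldl_nil]
      exact dpStep_spec cs _ k (by omega) ihlen ihval

-- ===== VERDICT (by name: the statement is the Claim_ definition above) =====
theorem minimumNoOfKeyPresses_spec : Claim_equal_minimumNoOfKeyPresses := by
  intro s _
  unfold Spec_minimumNoOfKeyPresses minimumNoOfKeyPresses minimumNoOfKeyPresses_alt
  obtain ⟨-, hval⟩ := dpInv s.toList s.toList.length le_rfl
  have h := hval s.toList.length le_rfl
  rw [List.take_length] at h
  simp only [PySem.List.pyGetD_natCast]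
  exact h
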